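-- pv_equiv track=rewrite | github.com/SSteve/AdventOfCode | Advent2020/6.py | ReadForms
-- ===== SOURCE A (Python) =====
-- from collections import defaultdict
-- from typing import Dict, List, Tuple
--
-- def ReadForms(formLines: List[str]) -> List:
--     groups: List[Tuple[int, Dict[str, int]]] = []
--
--     group = defaultdict(int)
--     formCount = 0
--     for formLine in formLines:
--         if len(formLine) == 0:
--             groups.append((formCount, group))
--             group = defaultdict(int)
--             formCount = 0
--         else:
--             formCount += 1
--             for answer in formLine:
--                 group[answer] += 1
--     if formCount > 0:
--         # We got to the end of the file while still evaluating a group.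
--         groups.append((formCount, group))
--     return groups
-- ===== SOURCE B (Python) =====
-- from collections import Counter, defaultdict
-- from typing import Dict, List, Tuple
--
-- def _group(segment: List[str]) -> Tuple[int, Dict[str, int]]:
--     # count every answer character in the segment in one Counter pass
--     return (len(segment), defaultdict(int, Counter("".join(segment))))
--
-- def ReadForms(formLines: List[str]) -> List:
--     # recursive split at the first blank line
--     if not formLines:
--         return []
--     i = 0
--     while i < len(formLines) and formLines[i] != "":
--         i += 1
--     head = _group(formLines[:i])
--     rest = formLines[i:]
--     if not rest:
--         return [head]
--     return [head] + ReadForms(rest[1:])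
-- ===== Notes on version B (the rewrite author's own statement) =====
-- stated objective: alternative
-- what changed: A is a single-pass state machine carrying a running group dict and counter across all lines; B recursively splits the input at the first blank line and builds each emitted group independently with one Counter pass over the joined segment.
import Mathlib
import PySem

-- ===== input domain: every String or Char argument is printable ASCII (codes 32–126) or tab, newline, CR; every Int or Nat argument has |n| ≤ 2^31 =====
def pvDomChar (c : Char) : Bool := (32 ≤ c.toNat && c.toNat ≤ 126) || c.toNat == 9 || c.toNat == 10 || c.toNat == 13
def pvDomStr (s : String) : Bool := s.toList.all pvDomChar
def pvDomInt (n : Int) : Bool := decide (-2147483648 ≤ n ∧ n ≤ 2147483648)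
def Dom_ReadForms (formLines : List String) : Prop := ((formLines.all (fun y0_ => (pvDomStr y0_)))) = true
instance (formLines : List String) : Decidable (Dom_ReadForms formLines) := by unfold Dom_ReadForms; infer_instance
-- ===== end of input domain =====

-- B re-reads the input as blank-line-separated segments processed by a recursive split +
-- one Counter pass per segment, instead of A's single-pass state machine; objective: alternative.

-- ===== PORT A =====
-- one loop step of A: flush on an empty line, otherwise count the line's characters
-- (defaultdict's `group[answer] += 1` is Dict.modify with default 0)
def aStep (st : (List (Int × (List (String × Int)))) × PySem.Dict String Int × Int)
    (formLine : String) : (List (Int × (List (String × Int)))) × PySem.Dict String Int × Int :=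
  if PySem.Str.len formLine = 0 then
    (st.1 ++ [(st.2.2, st.2.1.items)], PySem.Dict.empty, 0)
  else
    (st.1, formLine.toList.foldl (fun d c => d.modify (String.ofList [c]) 0 (· + 1)) st.2.1,
     st.2.2 + 1)

def ReadForms (formLines : List String) : List (Int × (List (String × Int))) :=
  let st := formLines.foldl aStep ([], PySem.Dict.empty, 0)
  if st.2.2 > 0 then st.1 ++ [(st.2.2, st.2.1.items)] else st.1

-- ===== PORT B =====
-- _group: segment length plus Counter over the characters of "".join(segment)
def grpB (segment : List String) : Int × (List (String × Int)) :=
  ((segment.length : Int),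
   (PySem.Dict.counter ((PySem.Str.join "" segment).toList.map (fun c => String.ofList [c]))).items)

-- recursive split at the first blank line (the while-scan is takeWhile; rest[1:] is drop 1)
def ReadForms_alt (formLines : List String) : List (Int × (List (String × Int))) :=
  if formLines = [] then []
  else
    if formLines.drop (formLines.takeWhile (fun l => l ≠ "")).length = [] then
      [grpB (formLines.takeWhile (fun l => l ≠ ""))]
    else
      grpB (formLines.takeWhile (fun l => l ≠ "")) ::
        ReadForms_alt ((formLines.drop (formLines.takeWhile (fun l => l ≠ "")).length).drop 1)
termination_by formLines.length
decreasing_by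
  rename_i _ hr
  simp only [List.length_drop]
  have := List.length_pos_iff.mpr hr
  simp [List.length_drop] at this
  omega

-- ===== PRECONDITION & SPEC =====
def Spec_ReadForms (formLines : List String) (out : List (Int × (List (String × Int)))) : Prop := out = ReadForms_alt formLines
instance (formLines : List String) (out : List (Int × (List (String × Int)))) : Decidable (Spec_ReadForms formLines out) := by unfold Spec_ReadForms; infer_instance

-- ===== CLAIM (what is proved, stated in full; the proofs are below) =====
def Claim_equal_ReadForms : Prop := ∀ (formLines : List String), Dom_ReadForms formLines → Spec_ReadForms formLines (ReadForms formLines)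

-- ===== LEMMAS AND PROOFS =====

-- an empty-line test, as A's loop performs it
theorem len_zero_iff (s : String) : PySem.Str.len s = 0 ↔ s = "" := by
  rw [PySem.Str.len_eq]
  simp

-- A's loop over a run of non-blank lines only counts: no group is emitted
theorem seg_fold (seg : List String) (gs : List (Int × (List (String × Int))))
    (d : PySem.Dict String Int) (n : Int) (h : ∀ l ∈ seg, l ≠ "") :
    seg.foldl aStep (gs, d, n) =
      (gs, seg.foldl (fun d line =>
          line.toList.foldl (fun d c => d.modify (String.ofList [c]) 0 (· + 1)) d) d,
        n + (seg.length : Int)) := by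
  induction seg generalizing gs d n with
  | nil => simp
  | cons a tl ih =>
    have ha : ¬ (PySem.Str.len a = 0) := by
      rw [len_zero_iff]; exact h a (List.mem_cons_self)
    simp only [List.foldl_cons, aStep, if_neg ha]
    rw [ih _ _ _ (fun l hl => h l (List.mem_cons_of_mem _ hl))]
    simp only [List.length_cons]
    congr 2
    push_cast
    ring

-- A's accumulator of finished groups is append-only
theorem prefix_fold (ls : List String) (gs : List (Int × (List (String × Int))))
    (d : PySem.Dict String Int) (n : Int) :
    ls.foldl aStep (gs, d, n) =
      (gs ++ (ls.foldl aStep ([], d, n)).1, (ls.foldl aStep ([], d, n)).2) := by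
  induction ls generalizing gs d n with
  | nil => simp
  | cons a tl ih =>
    by_cases ha : PySem.Str.len a = 0
    · simp only [List.foldl_cons, aStep, if_pos ha, List.nil_append]
      rw [ih (gs ++ [(n, d.items)]), ih [(n, d.items)]]
      simp
    · simp only [List.foldl_cons, aStep, if_neg ha, List.nil_append]
      rw [ih gs]

-- joining with the empty separator is concatenation
theorem join_nil_flatten (ls : List (List Char)) :
    PySem.Chars.join [] ls = ls.flatten := by
  induction ls with
  | nil => simp [PySem.Chars.join_nil]
  | cons p tl ih =>
    cases tl with
    | nil => simp [PySem.Chars.join_singleton]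
    | cons q rest =>
      rw [PySem.Chars.join_cons_cons]
      simp only [List.flatten_cons] at ih ⊢
      rw [ih]
      simp

-- B's one Counter pass over the joined segment is A's per-line counting fold
theorem grp_dict (seg : List String) (d : PySem.Dict String Int) :
    (PySem.Str.join "" seg).toList.foldl
        (fun d c => d.modify (String.ofList [c]) 0 (· + 1)) d =
      seg.foldl (fun d line =>
        line.toList.foldl (fun d c => d.modify (String.ofList [c]) 0 (· + 1)) d) d := by
  rw [PySem.Str.toList_join]
  have h0 : ("" : String).toList = [] := rfl
  rw [h0, join_nil_flatten]
  induction seg generalizing d with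
  | nil => simp
  | cons a tl ih =>
    simp only [List.map_cons, List.flatten_cons, List.foldl_append, List.foldl_cons]
    rw [ih]

-- the head group B emits is exactly the group A has accumulated over the segment
theorem grpB_eq (seg : List String) :
    grpB seg = ((seg.length : Int),
      (seg.foldl (fun d line =>
        line.toList.foldl (fun d c => d.modify (String.ofList [c]) 0 (· + 1)) d)
        PySem.Dict.empty).items) := by
  rw [grpB, PySem.Dict.counter_eq_foldl, List.foldl_map, grp_dict]

theorem main_eq (lines : List String) : ReadForms lines = ReadForms_alt lines := by
  generalize hn : lines.length = n
  induction n using Nat.strong_induction_on generalizing lines with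
  | _ n ih =>
    by_cases hnil : lines = []
    · subst hnil; simp [ReadForms, ReadForms_alt]
    · have hsplit : lines.takeWhile (fun l => l ≠ "") ++ lines.dropWhile (fun l => l ≠ "") = lines :=
        List.takeWhile_append_dropWhile
      set seg := lines.takeWhile (fun l => l ≠ "") with hsegdef
      set rest := lines.dropWhile (fun l => l ≠ "") with hrestdef
      have hdrop : lines.drop seg.length = rest := by
        conv_lhs => rw [← hsplit]
        exact List.drop_append_length
      have hseg : ∀ l ∈ seg, l ≠ "" := by
        intro l hl
        have := List.mem_takeWhile_imp hl
        simpa using this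
      have hA : ReadForms lines = ReadForms (seg ++ rest) := by rw [hsplit]
      rw [ReadForms_alt, if_neg hnil, hdrop, ← hsegdef]
      cases hrc : rest with
      | nil =>
        have hlseg : lines = seg := by rw [← hsplit, hrc, List.append_nil]
        have hsegne : seg ≠ [] := by rw [← hlseg]; exact hnil
        have hpos : (0 : Int) + (seg.length : Int) > 0 := by
          have := List.length_pos_iff.mpr hsegne
          omega
        rw [hA, hrc, List.append_nil, ReadForms]
        simp only [seg_fold seg [] PySem.Dict.empty 0 hseg, if_pos hpos]
        rw [grpB_eq]
        simp
      | cons r rest' =>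
        have hrne : rest ≠ [] := by rw [hrc]; exact List.cons_ne_nil r rest'
        have hrblank : r = "" := by
          have hrne' : List.dropWhile (fun l : String => decide (l ≠ "")) lines ≠ [] := by
            rw [← hrestdef]; exact hrne
          have h1 := List.head_dropWhile_not (fun l : String => decide (l ≠ "")) hrne'
          have h2 : List.dropWhile (fun l : String => decide (l ≠ "")) lines = r :: rest' := by
            rw [← hrestdef]; exact hrc
          simp only [h2, List.head_cons] at h1
          simpa using h1
        have hlenr : PySem.Str.len r = 0 := by rw [len_zero_iff]; exact hrblank
        have hlt : rest'.length < n := by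
          have : lines.length = seg.length + rest.length := by
            rw [← hsplit]; simp
          rw [hrc] at this
          simp at this
          omega
        rw [hA, hrc, ReadForms, List.foldl_append]
        simp only [seg_fold seg [] PySem.Dict.empty 0 hseg, List.foldl_cons, aStep,
          if_pos hlenr, List.nil_append]
        rw [prefix_fold rest' [((0 : Int) + (seg.length : Int),
          (seg.foldl (fun d line =>
            line.toList.foldl (fun d c => d.modify (String.ofList [c]) 0 (· + 1)) d)
            PySem.Dict.empty).items)] PySem.Dict.empty 0]
        have hIH : ReadForms rest' = ReadForms_alt rest' := ih rest'.length hlt rest' rfl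
        rw [ReadForms] at hIH
        rw [grpB_eq]
        simp only [List.drop_succ_cons, List.drop_zero]
        by_cases hc : (rest'.foldl aStep ([], PySem.Dict.empty, 0)).2.2 > 0
        · simp only [if_pos hc] at hIH ⊢
          rw [← hIH]
          simp
        · simp only [if_neg hc] at hIH ⊢
          rw [← hIH]
          simp

-- ===== VERDICT (by name: the statement is the Claim_ definition above) =====
theorem ReadForms_spec : Claim_equal_ReadForms := by
  intro lines _
  unfold Spec_ReadForms
  exact main_eq lines
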